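-- pv_equiv track=rewrite | github.com/nitin22032002/leetcode_question | Max min Height - GFG/max-min-height.py | find
-- ===== SOURCE A (Python) =====
-- def find(arr,mid,w):
--     start=0
--     cost=0
--     i=0
--     ans=0
--     tem=[0 for _ in range(len(arr))]
--     while(i<len(arr)):
--         if(i-start+1<=w):
--             if(arr[i]+cost<mid):
--                 tem[i]=(mid-arr[i]-cost)
--                 ans+=tem[i]
--                 cost+=tem[i]
--         else:
--             while((i-start+1)>w):
--                 cost-=tem[start]
--                 start+=1
--             if(arr[i]+cost<mid):
--                 tem[i]=(mid-arr[i]-cost)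
--                 cost+=tem[i]
--                 ans+=tem[i]
--         i+=1
--     return ans
-- ===== SOURCE B (Python) =====
-- def find(arr, mid, w):
--     n = len(arr)
--     diff = [0] * (n + 1)
--     cost = 0
--     ans = 0
--     for i in range(n):
--         cost += diff[i]
--         if arr[i] + cost < mid:
--             add = mid - arr[i] - cost
--             ans += add
--             cost += add
--             if i + w <= n:
--                 diff[i + w] -= add
--     return ans
-- ===== Notes on version B (the rewrite author's own statement) =====
-- stated objective: simpler
-- what changed: Replaces the sliding-window start pointer, inner shrink-while and per-index tem array with a single forward pass over a difference array that records each increment's expiry at index i+w, reproducing A's behaviour of never expiring increments whose expiry falls past the end (including w=0).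
import Mathlib
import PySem

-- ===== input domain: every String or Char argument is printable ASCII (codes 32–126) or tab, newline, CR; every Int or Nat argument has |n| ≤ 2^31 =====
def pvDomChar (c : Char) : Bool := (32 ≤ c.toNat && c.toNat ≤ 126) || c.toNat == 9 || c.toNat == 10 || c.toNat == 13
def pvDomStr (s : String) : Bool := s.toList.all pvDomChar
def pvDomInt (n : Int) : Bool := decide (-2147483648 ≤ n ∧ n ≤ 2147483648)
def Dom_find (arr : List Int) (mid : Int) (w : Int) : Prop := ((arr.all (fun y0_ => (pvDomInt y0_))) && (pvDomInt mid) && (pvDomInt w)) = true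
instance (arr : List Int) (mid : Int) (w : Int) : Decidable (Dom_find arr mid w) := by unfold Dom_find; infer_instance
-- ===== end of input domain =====

-- B replaces A's start pointer / inner while / tem array by one pass with a difference array; simpler.

-- ===== PORT A =====
-- inner `while (i-start+1) > w: cost -= tem[start]; start += 1` of A
def shrinkA (tem : List Int) (i w : Int) (start cost : Int) : Int × Int :=
  if h : i - start + 1 > w then
    shrinkA tem i w (start + 1) (cost - tem.getD start.toNat 0)
  else (start, cost)
termination_by (i + 1 - w - start).toNat
decreasing_by omega

-- outer `while i < len(arr)` of A, fuel = remaining iterations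
def loopA (arr : List Int) (mid w : Int) : ℕ → ℕ → Int → Int → Int → List Int → Int
  | 0, _, _, _, ans, _ => ans
  | k + 1, i, start, cost, ans, tem =>
    let a := arr.getD i 0
    if (i : Int) - start + 1 ≤ w then
      if a + cost < mid then
        let t := mid - a - cost
        loopA arr mid w k (i + 1) start (cost + t) (ans + t) (tem.set i t)
      else loopA arr mid w k (i + 1) start cost ans tem
    else
      let p := shrinkA tem (i : Int) w start cost
      if a + p.2 < mid then
        let t := mid - a - p.2
        loopA arr mid w k (i + 1) p.1 (p.2 + t) (ans + t) (tem.set i t)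
      else loopA arr mid w k (i + 1) p.1 p.2 ans tem

def find (arr : List Int) (mid : Int) (w : Int) : Int :=
  loopA arr mid w arr.length 0 0 0 0 (List.replicate arr.length 0)

-- ===== PORT B =====
-- `for i in range(n)` of B, fuel = remaining iterations
def loopB (arr : List Int) (mid w : Int) : ℕ → ℕ → Int → Int → List Int → Int
  | 0, _, _, ans, _ => ans
  | k + 1, i, cost, ans, diff =>
    let c := cost + diff.getD i 0
    let a := arr.getD i 0
    if a + c < mid then
      let add := mid - a - c
      let diff' := if (i : Int) + w ≤ (arr.length : Int) then
          diff.set ((i : Int) + w).toNat (diff.getD ((i : Int) + w).toNat 0 - add)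
        else diff
      loopB arr mid w k (i + 1) (c + add) (ans + add) diff'
    else loopB arr mid w k (i + 1) c ans diff

def find_alt (arr : List Int) (mid : Int) (w : Int) : Int :=
  loopB arr mid w arr.length 0 0 0 (List.replicate (arr.length + 1) 0)

-- ===== PRECONDITION & SPEC =====
-- Pre_ excludes negative w with a nonempty list, on which A's inner while-loop runs start past
-- the end of tem and raises IndexError (A returns on every other input).
def Pre_find (arr : List Int) (mid : Int) (w : Int) : Prop := 0 ≤ w ∨ arr = []
instance (arr : List Int) (mid : Int) (w : Int) : Decidable (Pre_find arr mid w) := by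
  unfold Pre_find; infer_instance

def pvWitness_find : List Int × Int × Int := ([1, 2], 3, 1)

def Spec_find (arr : List Int) (mid : Int) (w : Int) (out : Int) : Prop := out = find_alt arr mid w
instance (arr : List Int) (mid : Int) (w : Int) (out : Int) : Decidable (Spec_find arr mid w out) := by
  unfold Spec_find; infer_instance

-- ===== CLAIM (what is proved, stated in full; the proofs are below) =====
def Claim_equal_find : Prop := ∀ (arr : List Int) (mid : Int) (w : Int), Dom_find arr mid w → Pre_find arr mid w → Spec_find arr mid w (find arr mid w)

-- ===== LEMMAS AND PROOFS =====

lemma shrinkA_one (tem : List Int) (i w start cost : Int)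
    (h1 : i - start + 1 > w) (h2 : ¬ i - (start + 1) + 1 > w) :
    shrinkA tem i w start cost = (start + 1, cost - tem.getD start.toNat 0) := by
  rw [shrinkA, dif_pos h1, shrinkA, dif_neg h2]

lemma getD_set_self (l : List Int) (i : ℕ) (v : Int) (h : i < l.length) :
    (l.set i v).getD i 0 = v := by
  simp [List.getD, h]

lemma getD_set_ne (l : List Int) (i j : ℕ) (v : Int) (h : i ≠ j) :
    (l.set i v).getD j 0 = l.getD j 0 := by
  simp [List.getD, List.getElem?_set_ne h]

-- h5 (difference-array contents) is preserved by an iteration that adds t at index i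
lemma h5_step_add (arr : List Int) (w : Int) (hw : 0 ≤ w) (tem diff : List Int) (i : ℕ) (t : Int)
    (hin : i < arr.length) (htl : tem.length = arr.length) (hdl : diff.length = arr.length + 1)
    (h5 : ∀ m : ℕ, i ≤ m → m ≤ arr.length →
      diff.getD m 0 =
        if 1 ≤ w ∧ (m : Int) < (i : Int) + w ∧ w ≤ (m : Int)
        then -(tem.getD (m - w.toNat) 0) else 0) :
    ∀ m : ℕ, i + 1 ≤ m → m ≤ arr.length →
      (if (i : Int) + w ≤ (arr.length : Int) then
          diff.set ((i : Int) + w).toNat (diff.getD ((i : Int) + w).toNat 0 - t)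
        else diff).getD m 0 =
        if 1 ≤ w ∧ (m : Int) < ((i + 1 : ℕ) : Int) + w ∧ w ≤ (m : Int)
        then -((tem.set i t).getD (m - w.toNat) 0) else 0 := by
  intro m hm1 hm2
  by_cases hg : (i : Int) + w ≤ (arr.length : Int)
  · rw [if_pos hg]
    have hq : ((i : Int) + w).toNat = i + w.toNat := by omega
    by_cases hm : m = i + w.toNat
    · subst hm
      rw [hq, getD_set_self _ _ _ (by omega)]
      have h0 : diff.getD (i + w.toNat) 0 = 0 := by
        rw [h5 (i + w.toNat) (by omega) (by omega), if_neg (by push_cast; omega)]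
      rw [h0]
      split_ifs with hc
      · have he : i + w.toNat - w.toNat = i := by omega
        rw [he, getD_set_self _ _ _ (by omega)]
        ring
      · exact absurd ⟨by omega, by push_cast; omega, by push_cast; omega⟩ hc
    · rw [hq, getD_set_ne _ _ _ _ (by omega), h5 m (by omega) hm2]
      split_ifs
      · rw [getD_set_ne _ _ _ _ (by omega)]
      · exfalso; omega
      · exfalso; omega
      · rfl
  · rw [if_neg hg, h5 m (by omega) hm2]
    split_ifs
    · rw [getD_set_ne _ _ _ _ (by omega)]
    · exfalso; omega
    · exfalso; omega
    · rfl

-- h5 is preserved by an iteration that adds nothing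
lemma h5_step_noadd (arr : List Int) (w : Int) (tem diff : List Int) (i : ℕ)
    (h4 : ∀ j : ℕ, i ≤ j → tem.getD j 0 = 0)
    (h5 : ∀ m : ℕ, i ≤ m → m ≤ arr.length →
      diff.getD m 0 =
        if 1 ≤ w ∧ (m : Int) < (i : Int) + w ∧ w ≤ (m : Int)
        then -(tem.getD (m - w.toNat) 0) else 0) :
    ∀ m : ℕ, i + 1 ≤ m → m ≤ arr.length →
      diff.getD m 0 =
        if 1 ≤ w ∧ (m : Int) < ((i + 1 : ℕ) : Int) + w ∧ w ≤ (m : Int)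
        then -(tem.getD (m - w.toNat) 0) else 0 := by
  intro m hm1 hm2
  rw [h5 m (by omega) hm2]
  split_ifs
  · rfl
  · exfalso; omega
  · have he : m - w.toNat = i := by omega
    rw [he, h4 i le_rfl]
    simp
  · rfl

-- the zero part of h4 is preserved by setting index i
lemma h4_step (tem : List Int) (i : ℕ) (t : Int)
    (h4 : ∀ j : ℕ, i ≤ j → tem.getD j 0 = 0) :
    ∀ j : ℕ, i + 1 ≤ j → (tem.set i t).getD j 0 = 0 := by
  intro j hj
  rw [getD_set_ne _ _ _ _ (by omega), h4 j (by omega)]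

lemma loop_eq (arr : List Int) (mid w : Int) (hw : 0 ≤ w) :
    ∀ (k i : ℕ) (start cost ans : Int) (tem diff : List Int),
      i + k = arr.length →
      tem.length = arr.length →
      diff.length = arr.length + 1 →
      start = (if w = 0 then (i : Int) else max 0 ((i : Int) - w)) →
      (∀ j : ℕ, i ≤ j → tem.getD j 0 = 0) →
      (∀ m : ℕ, i ≤ m → m ≤ arr.length →
        diff.getD m 0 =
          if 1 ≤ w ∧ (m : Int) < (i : Int) + w ∧ w ≤ (m : Int)
          then -(tem.getD (m - w.toNat) 0) else 0) →
      loopA arr mid w k i start cost ans tem = loopB arr mid w k i cost ans diff := by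
  intro k
  induction k with
  | zero => intro i start cost ans tem diff _ _ _ _ _ _; rfl
  | succ k ih =>
    intro i start cost ans tem diff hk htl hdl hs h4 h5
    have hin : i < arr.length := by omega
    simp only [loopA, loopB]
    by_cases hw0 : w = 0
    · -- w = 0: A's while subtracts the still-zero tem[i]; B's diff[i] is still zero
      have hst : start = (i : Int) := by rw [hs, if_pos hw0]
      rw [hst]
      have hp : shrinkA tem (i : Int) w (i : Int) cost = ((i : Int) + 1, cost) := by
        rw [shrinkA_one _ _ _ _ _ (by omega) (by omega), Int.toNat_natCast, h4 i le_rfl,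
          sub_zero]
      have hd0 : diff.getD i 0 = 0 := by
        rw [h5 i le_rfl (by omega), if_neg (by omega)]
      rw [if_neg (by omega), hp, hd0, add_zero]
      by_cases hlt : arr.getD i 0 + cost < mid
      · rw [if_pos hlt, if_pos hlt]
        exact ih (i + 1) _ _ _ _ _ (by omega) (by simp [htl]) (by split_ifs <;> simp [hdl])
          (by rw [if_pos hw0]; push_cast; ring)
          (h4_step tem i _ h4)
          (h5_step_add arr w (by omega) tem diff i _ hin htl hdl h5)
      · rw [if_neg hlt, if_neg hlt]
        exact ih (i + 1) _ _ _ _ _ (by omega) htl hdl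
          (by rw [if_pos hw0]; push_cast; omega)
          (fun j hj => h4 j (by omega))
          (h5_step_noadd arr w tem diff i h4 h5)
    · by_cases hiw : w ≤ (i : Int)
      · -- w ≥ 1 and the window is full: A subtracts tem[i-w], B reads diff[i] = -tem[i-w]
        have hst : start = (i : Int) - w := by rw [hs, if_neg hw0]; omega
        rw [hst]
        have htn : ((i : Int) - w).toNat = i - w.toNat := by omega
        have hp : shrinkA tem (i : Int) w ((i : Int) - w) cost =
            ((i : Int) - w + 1, cost - tem.getD (i - w.toNat) 0) := by
          rw [shrinkA_one _ _ _ _ _ (by omega) (by omega), htn]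
        have hdi : diff.getD i 0 = -(tem.getD (i - w.toNat) 0) := by
          rw [h5 i le_rfl (by omega), if_pos ⟨by omega, by omega, by omega⟩]
        rw [if_neg (by omega), hp, hdi, ← sub_eq_add_neg]
        by_cases hlt : arr.getD i 0 + (cost - tem.getD (i - w.toNat) 0) < mid
        · rw [if_pos hlt, if_pos hlt]
          exact ih (i + 1) _ _ _ _ _ (by omega) (by simp [htl]) (by split_ifs <;> simp [hdl])
            (by rw [if_neg hw0]; push_cast; omega)
            (h4_step tem i _ h4)
            (h5_step_add arr w (by omega) tem diff i _ hin htl hdl h5)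
        · rw [if_neg hlt, if_neg hlt]
          exact ih (i + 1) _ _ _ _ _ (by omega) htl hdl
            (by rw [if_neg hw0]; push_cast; omega)
            (fun j hj => h4 j (by omega))
            (h5_step_noadd arr w tem diff i h4 h5)
      · -- w ≥ 1 and i < w: window not yet full, A's if-branch, diff[i] = 0
        have hst : start = 0 := by rw [hs, if_neg hw0]; omega
        rw [hst]
        have hd0 : diff.getD i 0 = 0 := by
          rw [h5 i le_rfl (by omega), if_neg (by omega)]
        rw [if_pos (by omega), hd0, add_zero]
        by_cases hlt : arr.getD i 0 + cost < mid
        · rw [if_pos hlt, if_pos hlt]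
          exact ih (i + 1) _ _ _ _ _ (by omega) (by simp [htl]) (by split_ifs <;> simp [hdl])
            (by rw [if_neg hw0]; push_cast; omega)
            (h4_step tem i _ h4)
            (h5_step_add arr w (by omega) tem diff i _ hin htl hdl h5)
        · rw [if_neg hlt, if_neg hlt]
          exact ih (i + 1) _ _ _ _ _ (by omega) htl hdl
            (by rw [if_neg hw0]; push_cast; omega)
            (fun j hj => h4 j (by omega))
            (h5_step_noadd arr w tem diff i h4 h5)

-- ===== VERDICT (by name: the statement is the Claim_ definition above) =====
theorem find_spec : Claim_equal_find := by
  intro arr mid w _ hpre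
  unfold Spec_find
  rcases hpre with hw | he
  · unfold find find_alt
    exact loop_eq arr mid w hw arr.length 0 0 0 0
      (List.replicate arr.length 0) (List.replicate (arr.length + 1) 0)
      (by omega) (by simp) (by simp)
      (by split_ifs <;> omega)
      (by intro j _; simp [List.getD])
      (by intro m _ _; rw [if_neg (by omega)]; simp [List.getD])
  · subst he; rfl
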